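-- pv_equiv track=rewrite | github.com/MAS-KE/ICDM_2020_KGC | utils/util.py | decode_reason
-- ===== SOURCE A (Python) =====
-- def decode_reason(start_seq, end_seq):
--     result = []
--     for s_id, st in enumerate(start_seq):
--         if st > 0:
--             for e_id in range(s_id, len(end_seq)):
--                 if end_seq[e_id] > 0:
--                     result.append([s_id, e_id + 1])
--                     break
--     return result
-- ===== SOURCE B (Python) =====
-- def decode_reason(start_seq, end_seq):
--     # One backward pass: nxt[i] = smallest j >= i with end_seq[j] > 0 (or None)
--     nxt = []
--     last = None
--     for j in range(len(end_seq) - 1, -1, -1):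
--         if end_seq[j] > 0:
--             last = j
--         nxt.append(last)
--     nxt.reverse()
--     result = []
--     for i, st in enumerate(start_seq):
--         if st > 0 and i < len(nxt) and nxt[i] is not None:
--             result.append([i, nxt[i] + 1])
--     return result
-- ===== Notes on version B (the rewrite author's own statement) =====
-- stated objective: alternative
-- what changed: Replaced the inner forward scan per positive start with a single backward pass precomputing the next-positive-end index for every position, giving O(1) lookup per start.
import Mathlib
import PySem

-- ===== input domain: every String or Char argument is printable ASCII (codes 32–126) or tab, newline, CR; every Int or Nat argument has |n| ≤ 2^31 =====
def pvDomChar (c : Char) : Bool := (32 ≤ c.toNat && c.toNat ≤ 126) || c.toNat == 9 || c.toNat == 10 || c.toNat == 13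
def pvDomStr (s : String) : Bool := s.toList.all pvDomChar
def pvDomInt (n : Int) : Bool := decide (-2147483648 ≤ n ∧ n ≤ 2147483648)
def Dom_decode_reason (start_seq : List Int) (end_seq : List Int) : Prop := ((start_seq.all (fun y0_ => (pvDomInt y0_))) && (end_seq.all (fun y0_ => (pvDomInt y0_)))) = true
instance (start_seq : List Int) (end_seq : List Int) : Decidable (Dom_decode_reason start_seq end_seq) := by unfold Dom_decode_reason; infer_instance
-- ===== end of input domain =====

-- B replaces A's per-start forward scan by one precomputed next-positive-end array (alternative O(n+m) algorithm; timing run did not confirm a speed-up at the largest size).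

-- ===== PORT A =====
-- inner loop: 'for e_id in range(s_id, len(end_seq)): if end_seq[e_id] > 0: append; break'
-- (index e_id is always in range here, so pyGetD with default 0 is exact)
def innerA (end_seq : List Int) (s_id : Int) (e_id : Int) (result : List (List Int)) : List (List Int) :=
  if h : e_id < (end_seq.length : Int) then
    if PySem.List.pyGetD end_seq e_id 0 > 0 then result ++ [[s_id, e_id + 1]]
    else innerA end_seq s_id (e_id + 1) result
  else result
termination_by ((end_seq.length : Int) - e_id).toNat
decreasing_by omega

-- outer loop: 'for s_id, st in enumerate(start_seq)'
def outerA (end_seq : List Int) : List Int → Int → List (List Int) → List (List Int)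
  | [], _, result => result
  | st :: rest, s_id, result =>
      outerA end_seq rest (s_id + 1) (if st > 0 then innerA end_seq s_id s_id result else result)

def decode_reason (start_seq : List Int) (end_seq : List Int) : List (List Int) :=
  outerA end_seq start_seq 0 []

-- ===== PORT B =====
-- nxt[i] = index of first positive element at position ≥ i (built right-to-left as in Source B)
def buildNxt (end_seq : List Int) (i : Int) : List (Option Int) :=
  match end_seq with
  | [] => []
  | x :: rest =>
      let tail := buildNxt rest (i + 1)
      (if x > 0 then some i else tail.headD none) :: tail

-- 'for i, st in enumerate(start_seq): if st > 0 and i < len(nxt) and nxt[i] is not None: append'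
def outerB (nxt : List (Option Int)) : List Int → Int → List (List Int) → List (List Int)
  | [], _, result => result
  | st :: rest, i, result =>
      outerB nxt rest (i + 1)
        (if st > 0 then
          match PySem.List.pyGetD nxt i none with
          | some j => result ++ [[i, j + 1]]
          | none => result
         else result)

def decode_reason_alt (start_seq : List Int) (end_seq : List Int) : List (List Int) :=
  outerB (buildNxt end_seq 0) start_seq 0 []

-- ===== PRECONDITION & SPEC =====
def Spec_decode_reason (start_seq : List Int) (end_seq : List Int) (out : List (List Int)) : Prop := out = decode_reason_alt start_seq end_seq
instance (start_seq : List Int) (end_seq : List Int) (out : List (List Int)) : Decidable (Spec_decode_reason start_seq end_seq out) := by unfold Spec_decode_reason; infer_instance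

-- ===== CLAIM (what is proved, stated in full; the proofs are below) =====
def Claim_equal_decode_reason : Prop := ∀ (start_seq : List Int) (end_seq : List Int), Dom_decode_reason start_seq end_seq → Spec_decode_reason start_seq end_seq (decode_reason start_seq end_seq)

-- ===== LEMMAS AND PROOFS =====

-- first positive index in l, counting from k: the value both programs compute per start
def fp : List Int → Int → Option Int
  | [], _ => none
  | x :: r, k => if x > 0 then some k else fp r (k + 1)

theorem buildNxt_length (l : List Int) (i : Int) : (buildNxt l i).length = l.length := by
  induction l generalizing i with
  | nil => rfl
  | cons x r ih => simp [buildNxt, ih]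

theorem buildNxt_headD (l : List Int) (i : Int) : (buildNxt l i).headD none = fp l i := by
  cases l with
  | nil => rfl
  | cons x r =>
    show (if x > 0 then some i else (buildNxt r (i + 1)).headD none) = _
    rw [fp, buildNxt_headD r (i + 1)]

theorem buildNxt_get (l : List Int) (i : Int) (m : Nat) (h : m < l.length) :
    (buildNxt l i)[m]? = some (fp (l.drop m) (i + m)) := by
  induction l generalizing i m with
  | nil => simp at h
  | cons x r ih =>
    cases m with
    | zero =>
      show some (if x > 0 then some i else (buildNxt r (i + 1)).headD none) = _
      rw [buildNxt_headD r (i + 1)]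
      simp [fp]
    | succ m' =>
      simp only [buildNxt, List.getElem?_cons_succ, List.drop_succ_cons]
      rw [ih (i + 1) m' (by simpa using h)]
      congr 2
      push_cast; ring

theorem innerA_eq_fp (end_seq : List Int) (s_id : Int) (e : Nat) (result : List (List Int)) :
    innerA end_seq s_id (e : Int) result =
      match fp (end_seq.drop e) (e : Int) with
      | some j => result ++ [[s_id, j + 1]]
      | none => result := by
  by_cases h : e < end_seq.length
  · rw [innerA]
    have hlt : (e : Int) < (end_seq.length : Int) := by exact_mod_cast h
    rw [dif_pos hlt]
    have hget : PySem.List.pyGetD end_seq (e : Int) 0 = end_seq[e] := by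
      rw [PySem.List.pyGetD_natCast, List.getD_eq_getElem _ _ h]
    have hdrop : end_seq.drop e = end_seq[e] :: end_seq.drop (e + 1) :=
      List.drop_eq_getElem_cons h
    rw [hdrop]
    simp only [fp, hget]
    split
    · rfl
    · have := innerA_eq_fp end_seq s_id (e + 1) result
      push_cast at this ⊢
      rw [this]
  · have hge : ¬ ((e : Int) < (end_seq.length : Int)) := by
      exact_mod_cast h
    rw [innerA, dif_neg hge]
    rw [List.drop_of_length_le (by omega)]
    rfl
termination_by end_seq.length - e
decreasing_by omega

theorem stepB_eq (end_seq : List Int) (i : Nat) (result : List (List Int)) :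
    (match PySem.List.pyGetD (buildNxt end_seq 0) (i : Int) none with
      | some j => result ++ [[(i : Int), j + 1]]
      | none => result) =
      match fp (end_seq.drop i) (i : Int) with
      | some j => result ++ [[(i : Int), j + 1]]
      | none => result := by
  by_cases h : i < end_seq.length
  · have hlen : i < (buildNxt end_seq 0).length := by rwa [buildNxt_length]
    rw [PySem.List.pyGetD_natCast, List.getD_eq_getElem?_getD,
      buildNxt_get end_seq 0 i h]
    simp
  · have hlen : ¬ i < (buildNxt end_seq 0).length := by rwa [buildNxt_length]
    rw [PySem.List.pyGetD_natCast, List.getD_eq_getElem?_getD,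
      List.getElem?_eq_none (by omega)]
    rw [List.drop_of_length_le (by omega)]
    rfl

theorem outer_eq (end_seq : List Int) (rest : List Int) (k : Nat) (result : List (List Int)) :
    outerA end_seq rest (k : Int) result = outerB (buildNxt end_seq 0) rest (k : Int) result := by
  induction rest generalizing k result with
  | nil => rfl
  | cons st r ih =>
    rw [outerA, outerB]
    have hk : ((k : Int) + 1) = ((k + 1 : Nat) : Int) := by push_cast; ring
    rw [hk, ih]
    congr 1
    split
    · rw [innerA_eq_fp end_seq (k : Int) k result, ← stepB_eq end_seq k result]
    · rfl

-- ===== VERDICT (by name: the statement is the Claim_ definition above) =====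
theorem decode_reason_spec : Claim_equal_decode_reason := by
  intro start_seq end_seq _
  unfold Spec_decode_reason decode_reason decode_reason_alt
  exact_mod_cast outer_eq end_seq start_seq 0 []
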